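-- pv_equiv track=rewrite | github.com/apache/superset | superset/mcp_service/chart/validation/pipeline.py | _redact_sql_where
-- ===== SOURCE A (Python) =====
-- def _redact_sql_where(error_str: str, error_str_upper: str) -> str:
--     """Redact WHERE clause content to prevent data disclosure."""
--     if "WHERE" not in error_str_upper:
--         return error_str
--
--     where_idx = error_str_upper.find("WHERE")
--     terminators = ["ORDER", "GROUP", "LIMIT", "UNION", "EXCEPT", "INTERSECT"]
--     term_idx = len(error_str)
--     for term in terminators:
--         idx = error_str_upper.find(term, where_idx)
--         if idx != -1 and idx < term_idx:
--             term_idx = idx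
--     return error_str[: where_idx + 6] + " [REDACTED]" + error_str[term_idx:]
-- ===== SOURCE B (Python) =====
-- def _redact_sql_where(error_str: str, error_str_upper: str) -> str:
--     """Redact WHERE clause content to prevent data disclosure."""
--     n = len(error_str_upper)
--     # single hand-written scan for the first occurrence of WHERE
--     w = 0
--     while w < n and error_str_upper[w:w + 5] != "WHERE":
--         w += 1
--     if w == n:  # no WHERE anywhere
--         return error_str
--     # scan forward from WHERE for the first position where any terminator starts
--     terms = ("ORDER", "GROUP", "LIMIT", "UNION", "EXCEPT", "INTERSECT")
--     m = len(error_str)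
--     t = w
--     while t < m and not any(error_str_upper.startswith(k, t) for k in terms):
--         t += 1
--     return error_str[:w + 6] + " [REDACTED]" + error_str[t:]
-- ===== Notes on version B (the rewrite author's own statement) =====
-- stated objective: alternative
-- what changed: Replaces the library find() calls and six-way running minimum with two hand-written left-to-right index scans: one loop locates the first WHERE by slice comparison, a second loop advances from there to the first position where any terminator starts.
import Mathlib
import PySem

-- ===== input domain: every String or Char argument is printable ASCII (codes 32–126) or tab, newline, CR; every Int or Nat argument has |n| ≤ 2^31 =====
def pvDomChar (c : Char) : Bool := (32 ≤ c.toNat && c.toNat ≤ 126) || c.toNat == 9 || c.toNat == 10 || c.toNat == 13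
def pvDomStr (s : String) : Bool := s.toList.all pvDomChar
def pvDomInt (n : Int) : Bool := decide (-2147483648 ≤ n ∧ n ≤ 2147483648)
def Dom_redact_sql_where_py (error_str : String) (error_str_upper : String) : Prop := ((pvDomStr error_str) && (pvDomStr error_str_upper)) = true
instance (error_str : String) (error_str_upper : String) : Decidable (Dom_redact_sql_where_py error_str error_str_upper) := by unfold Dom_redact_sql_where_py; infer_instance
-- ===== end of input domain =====

-- B replaces A's library find() calls and six-way running minimum with two hand-written
-- left-to-right index scans (locate WHERE, then the first terminator start); no speed claim.

-- ===== PORT A =====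
-- the 'for term in terminators' loop of A, as a helper
def pvTermIdxA (error_str : String) (error_str_upper : String) (where_idx : Int) : Int :=
  ["ORDER", "GROUP", "LIMIT", "UNION", "EXCEPT", "INTERSECT"].foldl
    (fun term_idx term =>
      let idx := PySem.Str.findFrom error_str_upper term where_idx none
      if idx ≠ -1 ∧ idx < term_idx then idx else term_idx)
    (PySem.Str.len error_str)

def redact_sql_where_py (error_str : String) (error_str_upper : String) : String :=
  if ¬ (PySem.Str.isIn "WHERE" error_str_upper = true) then error_str
  else
    let where_idx : Int := PySem.Str.find error_str_upper "WHERE"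
    let term_idx : Int := pvTermIdxA error_str error_str_upper where_idx
    String.ofList (PySem.Chars.slice error_str.toList none (some (where_idx + 6)) ++
      " [REDACTED]".toList ++ PySem.Chars.slice error_str.toList (some term_idx) none)

-- ===== PORT B =====
-- Source B's first while loop: advance w until error_str_upper[w:w+5] == "WHERE" or w == len
def pvScanWhere (u : List Char) (i : Nat) : Nat :=
  if _h : i < u.length then
    if PySem.Chars.slice u (some (i : Int)) (some ((i : Int) + 5)) = "WHERE".toList then i
    else pvScanWhere u (i + 1)
  else i
termination_by u.length - i

def pvTerms : List String := ["ORDER", "GROUP", "LIMIT", "UNION", "EXCEPT", "INTERSECT"]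

-- Source B's second while loop: advance t until some terminator starts at t or t == len(error_str)
def pvScanTerm (s u : List Char) (t : Nat) : Nat :=
  if _h : t < s.length then
    if pvTerms.any (fun k => PySem.Chars.startswith (u.drop t) k.toList) then t
    else pvScanTerm s u (t + 1)
  else t
termination_by s.length - t

def redact_sql_where_py_alt (error_str : String) (error_str_upper : String) : String :=
  let u := error_str_upper.toList
  let w := pvScanWhere u 0
  if w = u.length then error_str
  else
    let s := error_str.toList
    let t := pvScanTerm s u w
    String.ofList (s.take (w + 6) ++ " [REDACTED]".toList ++ s.drop t)

-- ===== PRECONDITION & SPEC =====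
def Spec_redact_sql_where_py (error_str : String) (error_str_upper : String) (out : String) : Prop := out = redact_sql_where_py_alt error_str error_str_upper
instance (error_str : String) (error_str_upper : String) (out : String) : Decidable (Spec_redact_sql_where_py error_str error_str_upper out) := by unfold Spec_redact_sql_where_py; infer_instance

-- ===== CLAIM (what is proved, stated in full; the proofs are below) =====
def Claim_equal_redact_sql_where_py : Prop := ∀ (error_str : String) (error_str_upper : String), Dom_redact_sql_where_py error_str error_str_upper → Spec_redact_sql_where_py error_str error_str_upper (redact_sql_where_py error_str error_str_upper)

-- ===== LEMMAS AND PROOFS =====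

-- A's running-minimum fold: the result is the initial value or one of the found indices,
-- it never exceeds the initial value, and it is ≤ every found index ≠ -1.
lemma pv_foldl_min_spec (F : String → Int) :
    ∀ (ts : List String) (a : Int),
      ((ts.foldl (fun acc t => if F t ≠ -1 ∧ F t < acc then F t else acc) a = a
          ∨ ∃ t ∈ ts, ts.foldl (fun acc t => if F t ≠ -1 ∧ F t < acc then F t else acc) a = F t ∧ F t ≠ -1)
        ∧ ts.foldl (fun acc t => if F t ≠ -1 ∧ F t < acc then F t else acc) a ≤ a
        ∧ ∀ t ∈ ts, F t ≠ -1 → ts.foldl (fun acc t => if F t ≠ -1 ∧ F t < acc then F t else acc) a ≤ F t) := by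
  intro ts
  induction ts with
  | nil => intro a; simp
  | cons t ts ih =>
    intro a
    simp only [List.foldl_cons]
    obtain ⟨h1, h2, h3⟩ := ih (if F t ≠ -1 ∧ F t < a then F t else a)
    have ha' : (if F t ≠ -1 ∧ F t < a then F t else a) ≤ a := by
      split_ifs with hc <;> omega
    refine ⟨?_, le_trans h2 ha', ?_⟩
    · rcases h1 with h1 | ⟨t', ht', heq, hne⟩
      · by_cases hc : F t ≠ -1 ∧ F t < a
        · right
          exact ⟨t, List.mem_cons_self, by rw [h1]; simp [hc], hc.1⟩
        · left; rw [h1]; simp [hc]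
      · right; exact ⟨t', List.mem_cons_of_mem _ ht', heq, hne⟩
    · intro t' ht' hne
      rcases List.mem_cons.mp ht' with rfl | hmem
      · by_cases hc : F t' ≠ -1 ∧ F t' < a
        · calc _ ≤ _ := h2
            _ = F t' := by simp [hc]
        · have haF : a ≤ F t' := by
            by_contra hlt
            exact hc ⟨hne, by omega⟩
          exact le_trans (le_trans h2 ha') haF
      · exact h3 t' hmem hne

-- a prefix of u.drop i with wn ≤ i is an infix of u.drop wn
lemma pv_prefix_drop_infix {t u : List Char} {wn i : Nat} (hle : wn ≤ i)
    (h : t <+: u.drop i) : t <:+: u.drop wn := by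
  have hdd : u.drop i = (u.drop wn).drop (i - wn) := by
    rw [List.drop_drop]; congr 1; omega
  rw [hdd] at h
  exact h.isInfix.trans (List.drop_suffix _ _).isInfix

-- B's first scan finds the first index with "WHERE" as a prefix of the drop, or u.length
lemma pvScanWhere_spec (u : List Char) :
    ∀ (i : Nat), i ≤ u.length →
      (pvScanWhere u i = u.length ∧ ∀ j, i ≤ j → ¬ ("WHERE".toList <+: u.drop j))
      ∨ (i ≤ pvScanWhere u i ∧ pvScanWhere u i < u.length
          ∧ "WHERE".toList <+: u.drop (pvScanWhere u i)
          ∧ ∀ j, i ≤ j → j < pvScanWhere u i → ¬ ("WHERE".toList <+: u.drop j)) := by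
  intro i hi
  generalize hd : u.length - i = d
  induction d generalizing i with
  | zero =>
    have hie : i = u.length := by omega
    rw [pvScanWhere]
    simp only [dif_neg (by omega : ¬ i < u.length)]
    left
    refine ⟨hie, ?_⟩
    intro j hj hp
    have h5 := hp.length_le
    simp [List.length_drop] at h5
    omega
  | succ d ih =>
    have hlt : i < u.length := by omega
    rw [pvScanWhere]
    simp only [dif_pos hlt]
    have hslice : PySem.Chars.slice u (some (i : Int)) (some ((i : Int) + 5))
        = (u.drop i).take 5 := by
      have h5 : ((i : Int) + 5) = (((i + 5 : Nat)) : Int) := by push_cast; ring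
      rw [h5]
      simp only [PySem.Chars.slice_eq_listSlice, PySem.List.slice_natCast]
      congr 1
      omega
    by_cases hm : PySem.Chars.slice u (some (i : Int)) (some ((i : Int) + 5)) = "WHERE".toList
    · simp only [if_pos hm]
      right
      refine ⟨le_refl i, hlt, ?_, by omega⟩
      rw [hslice] at hm
      exact hm ▸ List.take_prefix 5 (u.drop i)
    · simp only [if_neg hm]
      have hnp : ¬ ("WHERE".toList <+: u.drop i) := by
        intro hp
        apply hm
        rw [hslice]
        have := List.prefix_iff_eq_take.mp hp
        simpa using this.symm
      rcases ih (i + 1) (by omega) (by omega) with ⟨h1, h2⟩ | ⟨h1, h2, h3, h4⟩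
      · left
        refine ⟨h1, ?_⟩
        intro j hj
        rcases Nat.eq_or_lt_of_le hj with rfl | hj'
        · exact hnp
        · exact h2 j (by omega)
      · right
        refine ⟨by omega, h2, h3, ?_⟩
        intro j hj hj'
        rcases Nat.eq_or_lt_of_le hj with rfl | hj''
        · exact hnp
        · exact h4 j (by omega) hj'

-- B's second scan finds the first t ∈ [t0, s.length) where some terminator starts, else stops
lemma pvScanTerm_spec (s u : List Char) :
    ∀ (t0 : Nat), t0 ≤ s.length →
      (pvScanTerm s u t0 = s.length
          ∧ ∀ j, t0 ≤ j → j < s.length →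
              pvTerms.any (fun k => PySem.Chars.startswith (u.drop j) k.toList) = false)
      ∨ (t0 ≤ pvScanTerm s u t0 ∧ pvScanTerm s u t0 < s.length
          ∧ pvTerms.any (fun k => PySem.Chars.startswith (u.drop (pvScanTerm s u t0)) k.toList) = true
          ∧ ∀ j, t0 ≤ j → j < pvScanTerm s u t0 →
              pvTerms.any (fun k => PySem.Chars.startswith (u.drop j) k.toList) = false) := by
  intro t0 ht
  generalize hd : s.length - t0 = d
  induction d generalizing t0 with
  | zero =>
    have hte : t0 = s.length := by omega
    rw [pvScanTerm]
    simp only [dif_neg (by omega : ¬ t0 < s.length)]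
    left
    exact ⟨hte, fun j hj hj' => by omega⟩
  | succ d ih =>
    have hlt : t0 < s.length := by omega
    rw [pvScanTerm]
    simp only [dif_pos hlt]
    by_cases hm : pvTerms.any (fun k => PySem.Chars.startswith (u.drop t0) k.toList) = true
    · simp only [if_pos hm]
      right
      exact ⟨le_refl t0, hlt, hm, by omega⟩
    · simp only [if_neg hm]
      rw [Bool.not_eq_true] at hm
      rcases ih (t0 + 1) (by omega) (by omega) with ⟨h1, h2⟩ | ⟨h1, h2, h3, h4⟩
      · left
        refine ⟨h1, ?_⟩
        intro j hj hj'
        rcases Nat.eq_or_lt_of_le hj with rfl | hj'' 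
        · exact hm
        · exact h2 j (by omega) hj'
      · right
        refine ⟨by omega, h2, h3, ?_⟩
        intro j hj hj'
        rcases Nat.eq_or_lt_of_le hj with rfl | hj''
        · exact hm
        · exact h4 j (by omega) hj'

-- A's running minimum equals B's forward scan result (as an Int), at a start index inside u
lemma pv_term_idx_eq (error_str : String) (error_str_upper : String) (wn : Nat)
    (hw : wn ≤ error_str_upper.toList.length) (hws : wn ≤ error_str.toList.length) :
    pvTermIdxA error_str error_str_upper (wn : Int)
      = ((pvScanTerm error_str.toList error_str_upper.toList wn : Nat) : Int) := by
  set u := error_str_upper.toList with hu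
  set s := error_str.toList with hs
  set F : String → Int := fun t => PySem.Chars.findFrom u t.toList ((wn : Int)) none with hF
  set P : Nat → Bool := fun j => pvTerms.any (fun k => PySem.Chars.startswith (u.drop j) k.toList) with hP
  have hFspec : ∀ t, F t ≠ -1 →
      (wn : Int) ≤ F t ∧ t.toList <+: u.drop (F t).toNat ∧
        ∀ i, wn ≤ i → i < (F t).toNat → ¬ t.toList <+: u.drop i := by
    intro t ht
    exact PySem.Chars.findFrom_natCast_spec u t.toList wn hw ht
  have hFP : ∀ t ∈ pvTerms, F t ≠ -1 → P (F t).toNat = true := by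
    intro t ht hne
    obtain ⟨_, hpre, _⟩ := hFspec t hne
    simp only [hP, List.any_eq_true]
    exact ⟨t, ht, (PySem.Chars.startswith_iff _ _).mpr hpre⟩
  have hPF : ∀ i : Nat, wn ≤ i → P i = true →
      ∃ t ∈ pvTerms, F t ≠ -1 ∧ (F t).toNat ≤ i := by
    intro i hi hPi
    simp only [hP, List.any_eq_true] at hPi
    obtain ⟨t, ht, hsw⟩ := hPi
    have hpre := (PySem.Chars.startswith_iff _ _).mp hsw
    have hne : F t ≠ -1 := by
      intro hcon
      have := (PySem.Chars.findFrom_natCast_eq_neg_one_iff u t.toList wn hw).mp hcon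
      exact this (pv_prefix_drop_infix hi hpre)
    obtain ⟨hlb, _, hmin⟩ := hFspec t hne
    refine ⟨t, ht, hne, ?_⟩
    by_contra hgt
    exact hmin i hi (by omega) hpre
  have hgoal : pvTermIdxA error_str error_str_upper ((wn : Nat) : Int)
      = pvTerms.foldl (fun acc t => if F t ≠ -1 ∧ F t < acc then F t else acc)
          ((s.length : Nat) : Int) := by
    simp only [pvTermIdxA, pvTerms, hF, hu, hs, PySem.Str.findFrom_eq, PySem.Str.len_eq]
  rw [hgoal]
  obtain ⟨h1, h2, h3⟩ := pv_foldl_min_spec F pvTerms ((s.length : Nat) : Int)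
  rcases pvScanTerm_spec s u wn hws with ⟨hr, hnone⟩ | ⟨hr1, hr2, hr3, hr4⟩
  · -- no terminator start in [wn, s.length): the fold keeps s.length
    rw [hr]
    rcases h1 with h1 | ⟨t, ht, heq, hne⟩
    · exact h1
    · obtain ⟨hlb, _, _⟩ := hFspec t hne
      have hPt := hFP t ht hne
      have hge : (s.length : Int) ≤ F t := by
        by_contra hlt
        have hFn : (F t).toNat < s.length := by omega
        have := hnone (F t).toNat (by omega) hFn
        simp only [hP] at hPt
        rw [this] at hPt; exact absurd hPt (by simp)
      have := h3 t ht hne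
      omega
  · -- first terminator start at r := pvScanTerm s u wn
    set r := pvScanTerm s u wn with hrdef
    obtain ⟨t, ht, hne, hle⟩ := hPF r hr1 hr3
    obtain ⟨hlb, _, _⟩ := hFspec t hne
    have hFr : (F t).toNat = r := by
      by_contra hneq
      have hlt : (F t).toNat < r := by omega
      have hPt := hFP t ht hne
      simp only [hP] at hPt
      have := hr4 (F t).toNat (by omega) hlt
      rw [this] at hPt; exact absurd hPt (by simp)
    have hFt : F t = (r : Int) := by omega
    have hub := h3 t ht hne
    rw [hFt] at hub
    rcases h1 with h1 | ⟨t', ht', heq, hne'⟩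
    · omega
    · obtain ⟨hlb', _, _⟩ := hFspec t' hne'
      have hge : (r : Int) ≤ F t' := by
        by_contra hlt
        have hlt' : (F t').toNat < r := by omega
        have hPt' := hFP t' ht' hne'
        simp only [hP] at hPt'
        have := hr4 (F t').toNat (by omega) hlt'
        rw [this] at hPt'; exact absurd hPt' (by simp)
      omega

-- when WHERE sits past the end of error_str, A's running minimum keeps len(error_str)
lemma pv_term_idx_big (error_str : String) (error_str_upper : String) (wn : Nat)
    (hw : wn ≤ error_str_upper.toList.length) (hbig : error_str.toList.length < wn) :
    pvTermIdxA error_str error_str_upper (wn : Int) = ((error_str.toList.length : Nat) : Int) := by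
  set u := error_str_upper.toList with hu
  set s := error_str.toList with hs
  set F : String → Int := fun t => PySem.Chars.findFrom u t.toList ((wn : Int)) none with hF
  have hgoal : pvTermIdxA error_str error_str_upper ((wn : Nat) : Int)
      = pvTerms.foldl (fun acc t => if F t ≠ -1 ∧ F t < acc then F t else acc)
          ((s.length : Nat) : Int) := by
    simp only [pvTermIdxA, pvTerms, hF, hu, hs, PySem.Str.findFrom_eq, PySem.Str.len_eq]
  rw [hgoal]
  obtain ⟨h1, h2, _⟩ := pv_foldl_min_spec F pvTerms ((s.length : Nat) : Int)
  rcases h1 with h1 | ⟨t, ht, heq, hne⟩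
  · exact h1
  · have hlb : (wn : Int) ≤ F t := (PySem.Chars.findFrom_natCast_spec u t.toList wn hw hne).1
    omega

-- ===== VERDICT (by name: the statement is the Claim_ definition above) =====
theorem redact_sql_where_py_spec : Claim_equal_redact_sql_where_py := by
  intro error_str error_str_upper _
  unfold Spec_redact_sql_where_py redact_sql_where_py redact_sql_where_py_alt
  set u := error_str_upper.toList with hu
  set s := error_str.toList with hs
  by_cases hin : PySem.Str.isIn "WHERE" error_str_upper = true
  · -- WHERE occurs: both branches take their else-path
    have hinf : "WHERE".toList <:+: u := (PySem.Str.isIn_iff_infix _ _).mp hin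
    -- B's first scan finds the first occurrence
    rcases pvScanWhere_spec u 0 (Nat.zero_le _) with ⟨_, hnone⟩ | ⟨_, hwlt, hwpre, hwmin⟩
    · exfalso
      obtain ⟨j, hj⟩ := (PySem.Chars.exists_prefix_drop_iff_isIn "WHERE".toList u).mpr
        ((PySem.Chars.isIn_iff_infix _ _).mpr hinf)
      exact hnone j (Nat.zero_le _) hj
    · set w := pvScanWhere u 0 with hwdef
      -- A's find points at the same index
      have hnn : 0 ≤ PySem.Chars.find u "WHERE".toList :=
        (PySem.Chars.find_nonneg_iff _ _).mpr hinf
      obtain ⟨hfpre, hfmin⟩ := PySem.Chars.find_spec hnn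
      have hfw : (PySem.Chars.find u "WHERE".toList).toNat = w := by
        rcases Nat.lt_trichotomy (PySem.Chars.find u "WHERE".toList).toNat w with hlt | heq | hgt
        · exact absurd hfpre (hwmin _ (Nat.zero_le _) hlt)
        · exact heq
        · exact absurd hwpre (hfmin w hgt)
      have hfind : PySem.Str.find error_str_upper "WHERE" = ((w : Nat) : Int) := by
        have : PySem.Str.find error_str_upper "WHERE" = PySem.Chars.find u "WHERE".toList := by
          simp [hu]
        omega
      have hwne : ¬ (w = u.length) := by omega
      simp only [hin, not_true_eq_false, if_false, hfind]
      have htake : PySem.Chars.slice s none (some (((w : Nat) : Int) + 6)) = s.take (w + 6) := by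
        have h6 : (((w : Nat) : Int) + 6) = (((w + 6 : Nat)) : Int) := by push_cast; ring
        rw [h6, PySem.Chars.slice_eq_listSlice, PySem.List.slice_to_natCast]
      rw [htake]
      by_cases hws : w ≤ s.length
      · -- second phase: A's minimum = B's scan
        rw [pv_term_idx_eq error_str error_str_upper w (by simp only [← hu]; omega) hws]
        simp only [PySem.Chars.slice_eq_listSlice, PySem.List.slice_from_natCast]
        simp only [← hwdef, ← hu, ← hs, if_neg hwne]
      · -- WHERE past the end of error_str: both tails are empty
        have hA := pv_term_idx_big error_str error_str_upper w
          (by simp only [← hu]; omega) (by simp only [← hs]; omega)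
        rw [hA]
        have hB : pvScanTerm s u w = w := by
          rw [pvScanTerm]; simp only [dif_neg (by omega : ¬ w < s.length)]
        have e2 : List.drop w s = [] := List.drop_eq_nil_of_le (by omega)
        simp only [PySem.Chars.slice_eq_listSlice, PySem.List.slice_from_natCast]
        simp only [← hwdef, ← hs, if_neg hwne, hB, e2]
        simp [List.drop_length]
  · -- no WHERE: both return error_str unchanged
    have hninf : ¬ ("WHERE".toList <:+: u) := by
      intro h
      exact hin ((PySem.Str.isIn_iff_infix _ _).mpr h)
    have hin' : PySem.Chars.isIn ['W', 'H', 'E', 'R', 'E'] u = false := by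
      simpa using (PySem.Chars.isIn_eq_false_iff "WHERE".toList u).mpr hninf
    have hin'' : PySem.Chars.isIn ['W', 'H', 'E', 'R', 'E'] error_str_upper.toList = false := hin'
    rcases pvScanWhere_spec u 0 (Nat.zero_le _) with ⟨hw, _⟩ | ⟨_, _, hp, _⟩
    · simp [hin'', hw]
    · exact absurd (pv_prefix_drop_infix (Nat.zero_le _) hp) (by simpa using hninf)
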